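-- pv_equiv track=rewrite | github.com/Sandeep165/PYTHON_S | DAY29.py | correct_sentences
-- ===== SOURCE A (Python) =====
-- def correct_sentences(sentence):
--     sentence = " ".join(sentence.split())
--     ans= sentence.split(" ")
--     for i in range(1, len(ans)):
--         if(ans[i][0].isupper()):
--             ans[i-1] += "."
--     ans[-1] += "."
--     ans[0]= ans[0].replace(ans[0], ans[0].capitalize())
--     return " ".join(ans)
-- ===== SOURCE B (Python) =====
-- def correct_sentences(sentence):
--     words = sentence.split()
--     if not words:
--         return "."
--     words[0] = words[0].capitalize()
--     groups = [[words[0]]]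
--     for w in words[1:]:
--         if w[0].isupper():
--             groups.append([w])
--         else:
--             groups[-1].append(w)
--     return ". ".join(" ".join(g) for g in groups) + "."
-- ===== Notes on version B (the rewrite author's own statement) =====
-- stated objective: alternative
-- what changed: A normalizes whitespace, then mutates the word list in place by index (appending '.' to the previous word whenever a word starts uppercase) and capitalizes slot 0 afterwards via str.replace; B capitalizes the first word up front, materializes an explicit list of sentence-groups (a new group per uppercase-initial word) and rebuilds the result by joining each group with ' ', the groups with '. ', and a trailing '.'.
import Mathlib
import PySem

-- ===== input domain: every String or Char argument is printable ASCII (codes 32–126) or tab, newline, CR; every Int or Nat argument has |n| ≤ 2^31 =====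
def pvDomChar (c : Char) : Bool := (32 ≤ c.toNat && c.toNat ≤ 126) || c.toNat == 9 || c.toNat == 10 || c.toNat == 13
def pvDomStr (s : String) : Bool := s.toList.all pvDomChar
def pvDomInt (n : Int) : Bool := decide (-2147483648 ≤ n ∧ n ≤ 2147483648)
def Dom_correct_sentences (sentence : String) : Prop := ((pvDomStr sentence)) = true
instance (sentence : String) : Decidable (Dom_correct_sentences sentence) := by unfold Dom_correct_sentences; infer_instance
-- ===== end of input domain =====

-- B rebuilds the sentence from an explicit list of sentence-groups instead of A's
-- indexed in-place mutation pass (objective: alternative decomposition, same cost).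


-- shared helper: Python str.capitalize() (exact on the ASCII domain; both Pythons call it)
def pyCapitalize (cs : List Char) : List Char :=
  match cs with
  | [] => []
  | c :: t => PySem.Chars.upperChar c :: PySem.Chars.lower t

-- ===== PORT A =====
-- the pyGetD defaults are never used: every indexed word is nonempty and every index
-- is in range on every input (proved below), so Python's A never raises
def correct_sentences (sentence : String) : String :=
  let s1 : List Char := PySem.Chars.join [' '] (PySem.Chars.split₀ sentence.toList)
  let ans : List (List Char) := PySem.Chars.splitOn s1 [' ']
  let ans := (PySem.List.pyRange 1 (ans.length : Int) 1).foldl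
    (fun a i =>
      if PySem.Chars.isupper (PySem.List.pyGetD (PySem.List.pyGetD a i []) 0 ' ')
      then a.set (i - 1).toNat (PySem.List.pyGetD a (i - 1) [] ++ ['.'])
      else a) ans
  let ans := ans.set (ans.length - 1) (PySem.List.pyGetD ans (-1) [] ++ ['.'])
  let first := PySem.List.pyGetD ans 0 []
  let ans := ans.set 0 (PySem.Chars.replace first first (pyCapitalize first))
  String.mk (PySem.Chars.join [' '] ans)

-- ===== PORT B =====
def correct_sentences_alt (sentence : String) : String :=
  match PySem.Chars.split₀ sentence.toList with
  | [] => "."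
  | w0 :: rest =>
    let groups := rest.foldl
      (fun gs w =>
        if PySem.Chars.isupper (PySem.List.pyGetD w 0 ' ')
        then gs ++ [[w]]
        else gs.dropLast ++ [(gs.getLastD []) ++ [w]])
      [[pyCapitalize w0]]
    String.mk (PySem.Chars.join ['.', ' '] (groups.map (PySem.Chars.join [' '])) ++ ['.'])

-- ===== PRECONDITION & SPEC =====
def Spec_correct_sentences (sentence : String) (out : String) : Prop := out = correct_sentences_alt sentence
instance (sentence : String) (out : String) : Decidable (Spec_correct_sentences sentence out) := by unfold Spec_correct_sentences; infer_instance

-- ===== CLAIM (what is proved, stated in full; the proofs are below) =====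
def Claim_equal_correct_sentences : Prop := ∀ (sentence : String), Dom_correct_sentences sentence → Spec_correct_sentences sentence (correct_sentences sentence)

-- ===== LEMMAS AND PROOFS =====

-- first-char-is-uppercase test shared by both ports
def up0 (w : List Char) : Bool := PySem.Chars.isupper (PySem.List.pyGetD w 0 ' ')

-- A's loop body, named
def stepA (a : List (List Char)) (i : Int) : List (List Char) :=
  if up0 (PySem.List.pyGetD a i [])
  then a.set (i - 1).toNat (PySem.List.pyGetD a (i - 1) [] ++ ['.'])
  else a

-- B's loop body, named
def stepB (gs : List (List (List Char))) (w : List Char) : List (List (List Char)) :=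
  if up0 w then gs ++ [[w]] else gs.dropLast ++ [(gs.getLastD []) ++ [w]]

-- words with a dot appended wherever the NEXT word starts uppercase
def dots : List (List Char) → List (List Char)
  | [] => []
  | [w] => [w]
  | w :: w' :: t => (if up0 w' then w ++ ['.'] else w) :: dots (w' :: t)

-- like `dots`, but the last word also gets a dot
def dotsF : List (List Char) → List (List Char)
  | [] => []
  | [w] => [w ++ ['.']]
  | w :: w' :: t => (if up0 w' then w ++ ['.'] else w) :: dotsF (w' :: t)

-- structural (fuel-free) twin of `PySem.Chars.splitOn.go [' ']`
def sp : List Char → List Char → List (List Char) → List (List Char)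
  | [], cur, acc => (cur.reverse :: acc).reverse
  | c :: rest, cur, acc =>
      if c = ' ' then sp rest [] (cur.reverse :: acc) else sp rest (c :: cur) acc

def goodWord (w : List Char) : Prop := w ≠ [] ∧ ∀ c ∈ w, PySem.Chars.isspace c = false

theorem spGo (l : List Char) : ∀ (fuel : Nat) (cur : List Char) (acc : List (List Char)),
    l.length ≤ fuel → PySem.Chars.splitOn.go [' '] fuel l cur acc = sp l cur acc := by
  induction l with
  | nil =>
    intro fuel cur acc _
    cases fuel <;> rw [PySem.Chars.splitOn.go] <;> simp [sp]
  | cons c rest ih =>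
    intro fuel cur acc hlen
    cases fuel with
    | zero => simp at hlen
    | succ f =>
      rw [PySem.Chars.splitOn.go]
      simp only [List.isPrefixOf, Bool.and_true, beq_iff_eq]
      by_cases hc : c = ' '
      · subst hc
        rw [if_pos rfl]
        simp only [show ([' '] : List Char).length = 1 from rfl, List.drop_succ_cons,
          List.drop_zero]
        rw [ih f [] (cur.reverse :: acc) (by simp at hlen; omega)]
        simp [sp]
      · rw [if_neg (Ne.symm hc), ih f (c :: cur) acc (by simp at hlen; omega)]
        simp [sp, hc]

theorem sp_word (w : List Char) (hw : ' ' ∉ w) : ∀ (l cur : List Char) (acc : List (List Char)),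
    sp (w ++ l) cur acc = sp l (w.reverse ++ cur) acc := by
  induction w with
  | nil => intro l cur acc; simp
  | cons c t ih =>
    intro l cur acc
    simp only [List.mem_cons, not_or] at hw
    simp only [List.cons_append, sp]
    rw [if_neg (fun hc => hw.1 hc.symm), ih hw.2 l (c :: cur) acc]
    simp

theorem sp_join (ws : List (List Char)) (hne : ws ≠ []) (h : ∀ w ∈ ws, ' ' ∉ w) :
    ∀ acc, sp (PySem.Chars.join [' '] ws) [] acc = acc.reverse ++ ws := by
  induction ws with
  | nil => simp at hne
  | cons w ws ih =>
    intro acc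
    cases ws with
    | nil =>
      rw [PySem.Chars.join_singleton]
      rw [show w = w ++ [] from by simp, sp_word w (h w (by simp))]
      simp [sp]
    | cons w' t =>
      rw [PySem.Chars.join_cons_cons]
      rw [List.append_assoc, sp_word w (h w (by simp))]
      simp only [List.append_nil]
      rw [show ([' '] ++ PySem.Chars.join [' '] (w' :: t)) = ' ' :: PySem.Chars.join [' '] (w' :: t) from rfl]
      simp only [sp]
      rw [ih (by simp) (fun x hx => h x (by simp [hx])) (w.reverse.reverse :: acc)]
      simp

theorem splitOn_join (ws : List (List Char)) (h : ∀ w ∈ ws, ' ' ∉ w) :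
    PySem.Chars.splitOn (PySem.Chars.join [' '] ws) [' '] = if ws = [] then [[]] else ws := by
  rw [PySem.Chars.splitOn, spGo _ _ _ _ (by omega)]
  cases ws with
  | nil => simp [sp, PySem.Chars.join_nil]
  | cons w t => rw [sp_join _ (by simp) h []]; simp

theorem split₀_go_good (cs : List Char) : ∀ (cur : List Char) (acc : List (List Char)),
    (∀ c ∈ cur, PySem.Chars.isspace c = false) → (∀ w ∈ acc, goodWord w) →
    ∀ w ∈ PySem.Chars.split₀.go cs cur acc, goodWord w := by
  induction cs with
  | nil =>
    intro cur acc hcur hacc w hw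
    rw [PySem.Chars.split₀.go] at hw
    by_cases hc : cur.isEmpty
    · rw [if_pos hc] at hw; exact hacc w (by simpa using hw)
    · rw [if_neg hc] at hw
      simp only [List.mem_reverse, List.mem_cons] at hw
      rcases hw with rfl | hw
      · refine ⟨by simpa [List.isEmpty_iff] using hc, ?_⟩
        intro x hx; exact hcur x (by simpa using hx)
      · exact hacc w hw
  | cons c rest ih =>
    intro cur acc hcur hacc w hw
    rw [PySem.Chars.split₀.go] at hw
    by_cases hs : PySem.Chars.isspace c
    · rw [if_pos hs] at hw
      by_cases hc : cur.isEmpty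
      · rw [if_pos hc] at hw
        exact ih [] acc (by simp) hacc w hw
      · rw [if_neg hc] at hw
        refine ih [] (cur.reverse :: acc) (by simp) ?_ w hw
        intro x hx
        rcases List.mem_cons.1 hx with rfl | hx
        · refine ⟨by simpa [List.isEmpty_iff] using hc, ?_⟩
          intro y hy; exact hcur y (by simpa using hy)
        · exact hacc x hx
    · rw [if_neg hs] at hw
      refine ih (c :: cur) acc ?_ hacc w hw
      intro x hx
      rcases List.mem_cons.1 hx with rfl | hx
      · simpa using hs
      · exact hcur x hx

theorem split₀_good (cs : List Char) : ∀ w ∈ PySem.Chars.split₀ cs, goodWord w :=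
  split₀_go_good cs [] [] (by simp) (by simp)

theorem replace_self (s t : List Char) (h : s ≠ []) : PySem.Chars.replace s s t = t := by
  cases s with
  | nil => simp at h
  | cons c cs =>
    rw [PySem.Chars.replace]
    rw [if_neg (by simp)]
    simp only [List.length_cons]
    rw [PySem.Chars.replace.go]
    rw [if_pos (by simp [List.isPrefixOf_iff_prefix])]
    rw [show List.drop (c :: cs).length (c :: cs) = [] from by simp]
    cases hn : cs.length with
    | zero => rw [PySem.Chars.replace.go]; simp
    | succ k => rw [PySem.Chars.replace.go]; simp; omega

theorem cap_append_dot (w : List Char) : pyCapitalize (w ++ ['.']) = pyCapitalize w ++ ['.'] := by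
  cases w with
  | nil => decide
  | cons c t =>
    simp only [List.cons_append, pyCapitalize, PySem.Chars.lower, List.map_append]
    simp
    decide

theorem loopA : ∀ (suf pre : List (List Char)) (v : List Char),
    (PySem.List.pyRange ((pre.length : Int) + 1) ((pre.length : Int) + 1 + suf.length)).foldl stepA (pre ++ v :: suf)
      = pre ++ dots (v :: suf) := by
  intro suf
  induction suf with
  | nil =>
    intro pre v
    rw [PySem.List.pyRange_one_eq_nil (by simp)]
    simp [dots]
  | cons w t ih =>
    intro pre v
    rw [PySem.List.pyRange_one_cons (by push_cast [List.length_cons]; omega)]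
    simp only [List.foldl_cons]
    have hget : PySem.List.pyGetD (pre ++ v :: w :: t) ((pre.length : Int) + 1) [] = w := by
      rw [PySem.List.pyGetD_of_nonneg _ _ (by omega)]
      rw [show ((pre.length : Int) + 1).toNat = pre.length + 1 from by omega]
      rw [List.getD_append_right _ _ _ _ (by omega)]
      simp
    have hgetv : PySem.List.pyGetD (pre ++ v :: w :: t) ((pre.length : Int) + 1 - 1) [] = v := by
      rw [PySem.List.pyGetD_of_nonneg _ _ (by omega)]
      rw [show ((pre.length : Int) + 1 - 1).toNat = pre.length from by omega]
      rw [List.getD_append_right _ _ _ _ (by omega)]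
      simp
    rw [show stepA (pre ++ v :: w :: t) ((pre.length : Int) + 1)
        = pre ++ (if up0 w then v ++ ['.'] else v) :: w :: t from by
      unfold stepA
      rw [hget, hgetv]
      by_cases hu : up0 w
      · rw [if_pos hu, if_pos hu]
        rw [show ((pre.length : Int) + 1 - 1).toNat = pre.length from by omega]
        rw [List.set_append_right _ _ (by omega)]
        simp
      · rw [if_neg hu, if_neg hu]]
    have key := ih (pre ++ [(if up0 w then v ++ ['.'] else v)]) w
    simp only [List.length_append, List.length_cons, List.length_nil] at key ⊢
    push_cast at key ⊢
    rw [show ((pre.length : Int) + 1 + (t.length + 1)) = (pre.length + 1) + 1 + t.length from by ring,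
        show (pre ++ (if up0 w then v ++ ['.'] else v) :: w :: t) = ((pre ++ [(if up0 w then v ++ ['.'] else v)]) ++ w :: t) from by simp]
    rw [show ((pre.length : Int) + 1) + 1 + (t.length : Int) = ((pre.length : Int) + 1 + 1 + t.length) from by ring] at key ⊢
    rw [show ((pre.length : Int) + 1 + 1) = ((pre.length : Int) + 1) + 1 from by ring]
    rw [key]
    simp [dots]

theorem pyGetD_neg_one {α : Type} (xs : List α) (d : α) (h : xs ≠ []) :
    PySem.List.pyGetD xs (-1) d = xs.getLast h := by
  simp [PySem.List.pyGetD, PySem.List.pyGet?, PySem.List.pyIdx?]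
  rw [if_pos (by simpa [Nat.one_le_iff_ne_zero, List.length_eq_zero_iff] using h)]
  simp only [Option.bind_some]
  rw [List.getElem?_eq_getElem (by have := List.length_pos_iff.2 h; omega)]
  simp [List.getLast_eq_getElem]

theorem lastDot_cons (x : List Char) (L : List (List Char)) (h : L ≠ []) :
    (x :: L).set ((x :: L).length - 1) (PySem.List.pyGetD (x :: L) (-1) [] ++ ['.'])
      = x :: L.set (L.length - 1) (PySem.List.pyGetD L (-1) [] ++ ['.']) := by
  rw [pyGetD_neg_one _ _ (by simp), pyGetD_neg_one _ _ h]
  rw [List.getLast_cons h]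
  cases L with
  | nil => simp at h
  | cons y t => simp

theorem dots_ne_nil (ws : List (List Char)) (h : ws ≠ []) : dots ws ≠ [] := by
  cases ws with
  | nil => simp at h
  | cons w t => cases t <;> simp [dots]

theorem dots_last_dot (ws : List (List Char)) (h : ws ≠ []) :
    (dots ws).set ((dots ws).length - 1) (PySem.List.pyGetD (dots ws) (-1) [] ++ ['.']) = dotsF ws := by
  induction ws with
  | nil => simp at h
  | cons w t ih =>
    cases t with
    | nil =>
      simp only [dots, dotsF]
      rw [pyGetD_neg_one _ _ (by simp)]
      simp
    | cons w' t' =>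
      simp only [dots, dotsF]
      rw [lastDot_cons _ _ (dots_ne_nil _ (by simp))]
      rw [ih (by simp)]

theorem bfold_factor (rest : List (List Char)) : ∀ (gs : List (List (List Char))) (g : List (List Char)),
    rest.foldl stepB (gs ++ [g]) = gs ++ rest.foldl stepB [g] := by
  induction rest with
  | nil => simp
  | cons w t ih =>
    intro gs g
    simp only [List.foldl_cons]
    by_cases hu : up0 w
    · rw [show stepB (gs ++ [g]) w = (gs ++ [g]) ++ [[w]] from by simp [stepB, hu],
          show stepB [g] w = [g] ++ [[w]] from by simp [stepB, hu],
          ih (gs ++ [g]) [w], ih [g] [w]]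
      simp
    · rw [show stepB (gs ++ [g]) w = gs ++ [g ++ [w]] from by simp [stepB, hu],
          show stepB [g] w = [g ++ [w]] from by simp [stepB, hu]]
      exact ih gs (g ++ [w])

theorem bfold_ne_nil (rest : List (List Char)) : ∀ (g : List (List Char)),
    rest.foldl stepB [g] ≠ [] := by
  induction rest with
  | nil => simp
  | cons w t ih =>
    intro g
    simp only [List.foldl_cons]
    by_cases hu : up0 w
    · rw [show stepB [g] w = [g] ++ [[w]] from by simp [stepB, hu]]
      rw [bfold_factor]
      simp
    · rw [show stepB [g] w = [g ++ [w]] from by simp [stepB, hu]]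
      exact ih (g ++ [w])

theorem join_cons (sep a : List Char) (L : List (List Char)) (h : L ≠ []) :
    PySem.Chars.join sep (a :: L) = a ++ sep ++ PySem.Chars.join sep L := by
  cases L with
  | nil => simp at h
  | cons b t => exact PySem.Chars.join_cons_cons ..

theorem join_append (sep : List Char) (P L : List (List Char)) (hP : P ≠ []) (hL : L ≠ []) :
    PySem.Chars.join sep (P ++ L) = PySem.Chars.join sep P ++ sep ++ PySem.Chars.join sep L := by
  induction P with
  | nil => simp at hP
  | cons a P ih =>
    cases P with
    | nil =>
      rw [PySem.Chars.join_singleton]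
      simpa using join_cons sep a L hL
    | cons b Q =>
      rw [List.cons_append, join_cons sep a ((b :: Q) ++ L) (by simp),
          ih (by simp), join_cons sep a (b :: Q) (by simp)]
      simp

theorem join_concat_append (sep x y : List Char) (P : List (List Char)) :
    PySem.Chars.join sep (P ++ [x ++ y]) = PySem.Chars.join sep (P ++ [x]) ++ y := by
  cases P with
  | nil => simp [PySem.Chars.join_singleton]
  | cons a t =>
    rw [join_append sep _ [x ++ y] (by simp) (by simp),
        join_append sep _ [x] (by simp) (by simp)]
    simp [PySem.Chars.join_singleton]

theorem dotsF_head (w0 : List Char) (rest : List (List Char)) (f : List Char → List Char) :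
    (dotsF (w0 :: rest)).set 0 (f (PySem.List.pyGetD (dotsF (w0 :: rest)) 0 []))
      = (match rest with
         | [] => [f (w0 ++ ['.'])]
         | w' :: t => (if up0 w' then f (w0 ++ ['.']) else f w0) :: dotsF (w' :: t)) := by
  cases rest with
  | nil => simp [dotsF, PySem.List.pyGetD_of_nonneg]
  | cons w' t =>
    by_cases hu : up0 w'
    · simp [dotsF, hu, PySem.List.pyGetD_of_nonneg]
    · simp [dotsF, hu, PySem.List.pyGetD_of_nonneg]

theorem mainM (rest : List (List Char)) : ∀ (p : List (List Char)) (v : List Char),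
    PySem.Chars.join [' '] (p ++ dotsF (v :: rest))
      = PySem.Chars.join ['.', ' '] ((rest.foldl stepB [p ++ [v]]).map (PySem.Chars.join [' '])) ++ ['.'] := by
  induction rest with
  | nil =>
    intro p v
    simp only [dotsF, List.foldl_nil, List.map]
    rw [PySem.Chars.join_singleton, join_concat_append]
  | cons w t ih =>
    intro p v
    by_cases hu : up0 w
    · simp only [dotsF, List.foldl_cons, if_pos hu]
      rw [show stepB [p ++ [v]] w = [p ++ [v]] ++ [[w]] from by simp [stepB, hu]]
      rw [bfold_factor]
      rw [List.map_append]
      rw [join_append ['.', ' '] _ _ (by simp) (by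
        simp only [ne_eq, List.map_eq_nil_iff]
        exact bfold_ne_nil t [w])]
      have ihw := ih [] w
      simp only [List.nil_append] at ihw
      rw [show (p ++ (v ++ ['.']) :: dotsF (w :: t)) = (p ++ [v ++ ['.']]) ++ dotsF (w :: t) from by simp]
      rw [join_append [' '] _ _ (by simp) (by cases t <;> simp [dotsF])]
      rw [join_concat_append]
      rw [ihw]
      simp [PySem.Chars.join_singleton]
    · simp only [dotsF, List.foldl_cons, if_neg hu]
      rw [show stepB [p ++ [v]] w = [(p ++ [v]) ++ [w]] from by simp [stepB, hu]]
      rw [show (p ++ v :: dotsF (w :: t)) = ((p ++ [v]) ++ dotsF (w :: t)) from by simp]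
      exact ih (p ++ [v]) w

theorem dotsF_cap (w0 : List Char) (rest : List (List Char)) :
    (dotsF (w0 :: rest)).set 0 (pyCapitalize (PySem.List.pyGetD (dotsF (w0 :: rest)) 0 []))
      = dotsF (pyCapitalize w0 :: rest) := by
  rw [dotsF_head]
  cases rest with
  | nil => simp [dotsF, cap_append_dot]
  | cons w' t => by_cases hu : up0 w' <;> simp [dotsF, hu, cap_append_dot]

theorem dotsF_first_ne_nil (w0 : List Char) (rest : List (List Char)) (h : w0 ≠ []) :
    PySem.List.pyGetD (dotsF (w0 :: rest)) 0 [] ≠ [] := by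
  cases rest with
  | nil => simp [dotsF, PySem.List.pyGetD_of_nonneg]
  | cons w' t =>
    by_cases hu : up0 w' <;> simp [dotsF, hu, PySem.List.pyGetD_of_nonneg, h]

-- ===== VERDICT (by name: the statement is the Claim_ definition above) =====
theorem correct_sentences_spec : Claim_equal_correct_sentences := by
  intro s _
  unfold Spec_correct_sentences
  cases hws : PySem.Chars.split₀ s.toList with
  | nil =>
    simp only [correct_sentences, correct_sentences_alt, hws]
    rfl
  | cons w0 rest =>
    have hgood : ∀ w ∈ w0 :: rest, goodWord w := by rw [← hws]; exact split₀_good s.toList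
    have hns : ∀ w ∈ w0 :: rest, ' ' ∉ w := by
      intro w hw hsp
      have := (hgood w hw).2 ' ' hsp
      simp [PySem.Chars.isspace] at this
    simp only [correct_sentences, correct_sentences_alt, hws]
    rw [splitOn_join _ hns, if_neg (by simp)]
    have hloop := loopA rest [] w0
    simp only [List.length_nil, Nat.cast_zero, zero_add, List.nil_append] at hloop
    rw [show ((w0 :: rest).length : Int) = 1 + (rest.length : Int) from by push_cast [List.length_cons]; ring]
    rw [show (List.foldl
        (fun a i =>
          if PySem.Chars.isupper (PySem.List.pyGetD (PySem.List.pyGetD a i []) 0 ' ') = true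
          then a.set (i - 1).toNat (PySem.List.pyGetD a (i - 1) [] ++ ['.'])
          else a) (w0 :: rest) (PySem.List.pyRange 1 (1 + (rest.length : Int)) 1))
      = List.foldl stepA (w0 :: rest) (PySem.List.pyRange 1 (1 + (rest.length : Int)) 1) from rfl]
    rw [hloop]
    rw [dots_last_dot _ (by simp)]
    rw [replace_self _ _ (dotsF_first_ne_nil w0 rest (hgood w0 (by simp)).1)]
    rw [dotsF_cap]
    have hm := mainM rest [] (pyCapitalize w0)
    simp only [List.nil_append] at hm
    rw [hm]
    rfl
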